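-- pv_equiv track=rewrite | github.com/BAD4R/VideoCreation | SCRIPTS/DavinciScripts/VideoCombiners/clipsAndImages_script.py | alpha_token
-- ===== SOURCE A (Python) =====
-- def alpha_token(num: int) -> str:
--     n = max(0, int(num))
--     chars = []
--     while True:
--         chars.append(chr(ord("a") + (n % 26)))
--         n = n // 26
--         if n == 0:
--             break
--     return "".join(reversed(chars)).rjust(4, "a")
-- ===== SOURCE B (Python) =====
-- def alpha_token(num: int) -> str:
--     n = max(0, int(num))
--
--     def digits(m: int) -> str:
--         # most-significant-first, built by recursion on m // 26
--         if m < 26: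
--             return chr(ord("a") + m)
--         return digits(m // 26) + chr(ord("a") + m % 26)
--
--     s = digits(n)
--     while len(s) < 4:
--         s = "a" + s
--     return s
-- ===== Notes on version B (the rewrite author's own statement) =====
-- stated objective: alternative
-- what changed: B replaces A's remainder-list + reverse + rjust pipeline by a recursive most-significant-first string builder plus a prepend loop for the padding, so no list, no reversal and no rjust are used.
import Mathlib
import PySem

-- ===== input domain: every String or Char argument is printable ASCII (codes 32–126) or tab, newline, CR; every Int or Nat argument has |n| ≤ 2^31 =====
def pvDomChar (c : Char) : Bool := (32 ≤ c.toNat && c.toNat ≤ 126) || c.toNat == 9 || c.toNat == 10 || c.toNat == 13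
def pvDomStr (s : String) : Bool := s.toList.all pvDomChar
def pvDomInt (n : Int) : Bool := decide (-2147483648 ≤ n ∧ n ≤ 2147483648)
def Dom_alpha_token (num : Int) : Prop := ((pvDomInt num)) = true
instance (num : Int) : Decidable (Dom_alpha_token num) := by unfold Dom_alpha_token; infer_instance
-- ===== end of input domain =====

-- B replaces A's remainder-list/reverse/rjust pipeline by a recursive most-significant-first
-- string builder plus a prepend-padding loop (alternative decomposition, same cost).


-- ===== PORT A =====
-- A's while-loop: append chr(97 + n % 26), n //= 26, break when n == 0 (LSB-first list).
def pvLoopA (n : Nat) : List Char :=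
  Char.ofNat (97 + n % 26) :: (if h : n / 26 = 0 then [] else pvLoopA (n / 26))
decreasing_by
  exact Nat.div_lt_self (Nat.pos_of_ne_zero (fun h0 => h (by simp [h0]))) (by norm_num)

def alpha_token (num : Int) : String :=
  let n := (max 0 num).toNat          -- n = max(0, int(num)); nonnegative, so Nat is exact
  let chars := pvLoopA n
  let s := chars.reverse              -- "".join(reversed(chars))
  String.mk (List.replicate (4 - s.length) 'a' ++ s)   -- .rjust(4, "a"), ported by hand (exact)

-- ===== PORT B =====
-- B's recursive helper digits(m): MSB-first string by recursion on m // 26.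
def pvDigitsB (m : Nat) : List Char :=
  if h : m < 26 then [Char.ofNat (97 + m)]
  else pvDigitsB (m / 26) ++ [Char.ofNat (97 + m % 26)]
decreasing_by
  exact Nat.div_lt_self (by omega) (by norm_num)

-- B's padding loop: while len(s) < 4: s = "a" + s
def pvPadB (s : List Char) : List Char :=
  if s.length < 4 then pvPadB ('a' :: s) else s
termination_by 4 - s.length

def alpha_token_alt (num : Int) : String :=
  let n := (max 0 num).toNat
  String.mk (pvPadB (pvDigitsB n))

-- ===== PRECONDITION & SPEC =====
def Spec_alpha_token (num : Int) (out : String) : Prop := out = alpha_token_alt num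
instance (num : Int) (out : String) : Decidable (Spec_alpha_token num out) := by unfold Spec_alpha_token; infer_instance

-- ===== CLAIM (what is proved, stated in full; the proofs are below) =====
def Claim_equal_alpha_token : Prop := ∀ (num : Int), Dom_alpha_token num → Spec_alpha_token num (alpha_token num)

-- ===== LEMMAS AND PROOFS =====
theorem pvDigitsB_eq_reverse (n : Nat) : pvDigitsB n = (pvLoopA n).reverse := by
  induction n using Nat.strong_induction_on with
  | _ n ih =>
    rw [pvDigitsB, pvLoopA]
    by_cases h : n < 26
    · have h0 : n / 26 = 0 := Nat.div_eq_of_lt h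
      have hm : n % 26 = n := Nat.mod_eq_of_lt h
      simp [h, h0, hm]
    · have h0 : n / 26 ≠ 0 := by
        intro hz; exact h (Nat.lt_of_div_eq_zero (by norm_num) hz)
      have hlt : n / 26 < n := Nat.div_lt_self (by omega) (by norm_num)
      simp [h, h0, ih _ hlt]

theorem pvPadB_eq_replicate (s : List Char) :
    pvPadB s = List.replicate (4 - s.length) 'a' ++ s := by
  by_cases h4 : s.length < 4
  · -- induct on the deficit
    have : ∀ k s, 4 - s.length = k → pvPadB s = List.replicate (4 - s.length) 'a' ++ s := by
      intro k
      induction k with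
      | zero =>
        intro s hs
        rw [pvPadB]
        have : ¬ s.length < 4 := by omega
        simp [this, hs]
      | succ k ih =>
        intro s hs
        have hlt : s.length < 4 := by omega
        rw [pvPadB, if_pos hlt, ih ('a' :: s) (by simp; omega)]
        have h1 : 4 - ('a' :: s).length = (4 - s.length) - 1 := by simp; omega
        rw [h1]
        have h2 : 4 - s.length = ((4 - s.length) - 1) + 1 := by omega
        conv_rhs => rw [h2, List.replicate_succ']
        simp
    exact this _ s rfl
  · rw [pvPadB, if_neg h4]
    have : 4 - s.length = 0 := by omega
    simp [this]

theorem alpha_token_eq (num : Int) : alpha_token num = alpha_token_alt num := by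
  simp only [alpha_token, alpha_token_alt, pvDigitsB_eq_reverse, pvPadB_eq_replicate,
    List.length_reverse]

-- ===== VERDICT (by name: the statement is the Claim_ definition above) =====
theorem alpha_token_spec : Claim_equal_alpha_token := by
  intro num _
  exact alpha_token_eq num
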